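-- pv_equiv track=rewrite | github.com/newmind95/PracticalProgramminAnIntroductionToComputerScienceUsingPython | Chapter13/selection_sort/selection_sort.py | find_min
-- ===== SOURCE A (Python) =====
-- def find_min(L, b):
--     """ (list, int) -> int
--     Precondition L[b:] is not empty
--     Return the index of the smallest value in L[b:].
--     """
--
--     smallest = b    # The index of the smallest so far.
--     i = b + 1
--     while i != len(L):
--         if L[i] < L[smallest]:
--             smallest = i
--
--         i = i + 1
--
--     return smallest
--
-- L = [-2, 1, 4, 6, 7, 8, 9, 11]
-- ===== SOURCE B (Python) =====
-- def find_min(L, b):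
--     """ (list, int) -> int
--     Precondition L[b:] is not empty
--     Return the index of the smallest value in L[b:].
--     """
--     m = min(L[b:])
--     return L.index(m, b)
-- ===== Notes on version B (the rewrite author's own statement) =====
-- stated objective: simpler
-- what changed: Replaces A's fused index-tracking while-loop with a two-pass decomposition: compute the minimum value with min(L[b:]) and locate its first position at or after b with L.index(m, b).
-- intended difference: For negative b (with -len(L) <= b < len(L)) A's negative-index wraparound makes its scan run past the slice and compare every element of L again, so A returns a negative index or the index of an element smaller than min(L[b:]) outside the slice, while B returns the first non-negative index >= len(L)+b of the smallest value of L[b:], which is what the docstring asks for. — e.g. on find_min([1, 3], -1): A returns 0, B returns 1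
-- outside the precondition, e.g. on find_min([], -1): A returns -1, B raises ValueError
import Mathlib
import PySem

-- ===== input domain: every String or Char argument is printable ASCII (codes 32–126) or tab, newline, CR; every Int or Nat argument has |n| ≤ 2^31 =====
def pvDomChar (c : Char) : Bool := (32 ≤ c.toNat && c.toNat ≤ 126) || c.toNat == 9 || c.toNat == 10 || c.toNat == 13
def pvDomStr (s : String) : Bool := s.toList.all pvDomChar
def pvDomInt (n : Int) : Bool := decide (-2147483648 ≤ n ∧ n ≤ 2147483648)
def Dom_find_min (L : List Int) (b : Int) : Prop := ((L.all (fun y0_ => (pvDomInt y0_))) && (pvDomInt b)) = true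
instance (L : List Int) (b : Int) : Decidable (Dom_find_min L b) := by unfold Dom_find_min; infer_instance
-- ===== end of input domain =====

-- B replaces A's fused index-tracking while-loop by a two-pass 'find the minimum value, then
-- find its first index at or after b' decomposition (objective: simpler).


-- ===== PORT A =====
-- 'while i != len(L): if L[i] < L[smallest]: smallest = i; i += 1'.
-- Exact wherever the Python loop terminates (there i never exceeds len(L), so 'i < len' exits at
-- the same point as 'i != len'; for i > len(L) the Python diverges, outside Pre_).
-- An out-of-range access (pyGet? = none) is Python's IndexError: unreachable inside Pre_.
def findMinLoop (L : List Int) (smallest : Int) (i : Int) : Int :=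
  if _h : i < (L.length : Int) then
    match PySem.List.pyGet? L i, PySem.List.pyGet? L smallest with
    | some x, some y =>
        if x < y then findMinLoop L i (i + 1) else findMinLoop L smallest (i + 1)
    | _, _ => smallest
  else smallest
termination_by ((L.length : Int) - i).toNat
decreasing_by all_goals omega

def find_min (L : List Int) (b : Int) : Int :=
  findMinLoop L b (b + 1)

-- ===== PORT B =====
-- 'm = min(L[b:]); return L.index(m, b)'.
-- list.index(v, start) has no PySem primitive, so it is ported by hand: Python clamps the start
-- exactly like a slice start (negative start += len, floor 0, cap len) and searches from there —
-- that clamp is PySem.List.clampIdx; 'none' branches are min's/index's ValueError (outside Pre_).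
def find_min_alt (L : List Int) (b : Int) : Int :=
  let tail := PySem.List.slice L (some b) none
  match PySem.List.min? tail (fun x => x) with
  | none => 0
  | some m =>
      let s := PySem.List.clampIdx L.length b
      match PySem.List.index? (L.drop s) m with
      | some k => ((s + k : Nat) : Int)
      | none => -1

-- ===== PRECONDITION & SPEC =====
-- Pre_: where the Python A returns, except ([], -1): for b < -len(L) A raises IndexError on
-- L[smallest], for b ≥ len(L) the while loop never reaches len(L) and A diverges, and on the one
-- excluded returning corner ([], -1) — empty list, where the docstring precondition 'L[b:] is not
-- empty' fails — A's loop body never runs and it returns b = -1, a value B cannot reproduce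
-- because min([]) raises ValueError.
def Pre_find_min (L : List Int) (b : Int) : Prop :=
  -(L.length : Int) ≤ b ∧ b < (L.length : Int)
instance (L : List Int) (b : Int) : Decidable (Pre_find_min L b) := by
  unfold Pre_find_min; infer_instance
def pvWitness_find_min : List Int × Int := ([3, 1, 2], 1)

-- For negative b (with -len(L) ≤ b < len(L)) A's negative-index wraparound makes its scan run past
-- the slice and compare every element of L again, so A returns a negative index or the index of an
-- element outside L[b:] that is smaller than min(L[b:]), while B returns the first non-negative
-- index ≥ len(L)+b of the smallest value of L[b:], which is what the docstring asks for.
def D_find_min (_L : List Int) (b : Int) : Prop := b < 0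
instance (L : List Int) (b : Int) : Decidable (D_find_min L b) := by
  unfold D_find_min; infer_instance

def Spec_find_min (L : List Int) (b : Int) (out : Int) : Prop :=
  ¬ D_find_min L b → out = find_min_alt L b
instance (L : List Int) (b : Int) (out : Int) : Decidable (Spec_find_min L b out) := by
  unfold Spec_find_min; infer_instance

def pvDiffWitness_find_min : List Int × Int := ([1, 3], -1)
def pvDiffWitnessOut_find_min : Int × Int := (0, 1)

-- ===== CLAIM (what is proved, stated in full; the proofs are below) =====
def Claim_unchanged_find_min : Prop := ∀ (L : List Int) (b : Int), Dom_find_min L b → Pre_find_min L b → Spec_find_min L b (find_min L b)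
def Claim_changed_find_min : Prop := Dom_find_min (pvDiffWitness_find_min.1) (pvDiffWitness_find_min.2) ∧ Pre_find_min (pvDiffWitness_find_min.1) (pvDiffWitness_find_min.2) ∧ D_find_min (pvDiffWitness_find_min.1) (pvDiffWitness_find_min.2) ∧ find_min (pvDiffWitness_find_min.1) (pvDiffWitness_find_min.2) = pvDiffWitnessOut_find_min.1 ∧ find_min_alt (pvDiffWitness_find_min.1) (pvDiffWitness_find_min.2) = pvDiffWitnessOut_find_min.2 ∧ pvDiffWitnessOut_find_min.1 ≠ pvDiffWitnessOut_find_min.2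

-- ===== LEMMAS AND PROOFS =====

-- Index of the first minimum of a list (0 on []).
def fam : List Int → Nat
  | [] => 0
  | x :: xs => if xs.all (fun y => decide (x ≤ y)) then 0 else 1 + fam xs

-- A's loop computes 'fam' of the not-yet-scanned suffix headed by the current best element.
lemma loop_char (L : List Int) (t : List Int) :
    ∀ (s i : Int), 0 ≤ s → s < (L.length : Int) → 0 ≤ i → t = L.drop i.toNat →
      findMinLoop L s i =
        if fam (L.getD s.toNat 0 :: t) = 0 then s
        else i + ((fam (L.getD s.toNat 0 :: t) : Int) - 1) := by
  induction t with
  | nil =>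
    intro s i hs0 hs1 hi0 ht
    have hlen : (L.length : Int) ≤ i := by
      by_contra h
      have h2 : L.length ≤ i.toNat := List.drop_eq_nil_iff.mp ht.symm
      omega
    rw [findMinLoop]
    rw [dif_neg (by omega)]
    simp [fam]
  | cons x rest IH =>
    intro s i hs0 hs1 hi0 ht
    have hixlt : i.toNat < L.length := by
      by_contra h
      rw [List.drop_eq_nil_of_le (by omega)] at ht
      exact List.cons_ne_nil _ _ ht
    have hilt : i < (L.length : Int) := by omega
    have hdrop : L.drop i.toNat = L[i.toNat] :: L.drop (i.toNat + 1) :=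
      List.drop_eq_getElem_cons hixlt
    rw [hdrop] at ht
    have hx : x = L[i.toNat] := ((List.cons.injEq _ _ _ _).mp ht).1
    have hrest : rest = L.drop (i.toNat + 1) := ((List.cons.injEq _ _ _ _).mp ht).2
    have hslt : s.toNat < L.length := by omega
    have hgy : L.getD s.toNat 0 = L[s.toNat] := List.getD_eq_getElem L 0 hslt
    rw [findMinLoop, dif_pos hilt,
        PySem.List.pyGet?_eq_some_getElem L hi0 hilt,
        PySem.List.pyGet?_eq_some_getElem L hs0 hs1]
    show (if L[i.toNat] < L[s.toNat] then findMinLoop L i (i + 1) else findMinLoop L s (i + 1)) =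
      if fam (L.getD s.toNat 0 :: x :: rest) = 0 then s
      else i + ((fam (L.getD s.toNat 0 :: x :: rest) : Int) - 1)
    have htn : (i + 1).toNat = i.toNat + 1 := by omega
    by_cases hlt : L[i.toNat] < L[s.toNat]
    · rw [if_pos hlt]
      have := IH i (i + 1) hi0 hilt (by omega) (by rw [htn, hrest])
      rw [this]
      have hgx : L.getD i.toNat 0 = L[i.toNat] := List.getD_eq_getElem L 0 hixlt
      have hfam2 : fam (L.getD s.toNat 0 :: x :: rest) = 1 + fam (x :: rest) := by
        rw [fam]
        rw [if_neg ?_]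
        simp only [List.all_cons, Bool.and_eq_true, decide_eq_true_eq]
        rw [hgy, hx]
        intro hcon
        exact absurd hcon.1 (by omega)
      rw [hfam2, hgx, ← hx]
      rcases Nat.eq_zero_or_pos (fam (x :: rest)) with h0 | hpos
      · rw [h0]; simp
      · rw [if_neg (by omega), if_neg (by omega)]
        push_cast
        omega
    · rw [if_neg hlt]
      have := IH s (i + 1) hs0 hs1 (by omega) (by rw [htn, hrest])
      rw [this]
      have hyx : L[s.toNat] ≤ L[i.toNat] := by omega
      by_cases hall : rest.all (fun z => decide (L.getD s.toNat 0 ≤ z)) = true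
      · have hf1 : fam (L.getD s.toNat 0 :: rest) = 0 := by
          rw [fam, if_pos hall]
        have hf2 : fam (L.getD s.toNat 0 :: x :: rest) = 0 := by
          rw [fam, if_pos ?_]
          simp only [List.all_cons, Bool.and_eq_true, decide_eq_true_eq]
          exact ⟨by rw [hgy, hx]; exact hyx, by simpa using hall⟩
        rw [hf1, hf2]
        simp
      · have hf1 : fam (L.getD s.toNat 0 :: rest) = 1 + fam rest := by
          rw [fam, if_neg hall]
        obtain ⟨z, hzmem, hz⟩ : ∃ z ∈ rest, ¬ (L.getD s.toNat 0 ≤ z) := by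
          simpa using hall
        have hfx : fam (x :: rest) = 1 + fam rest := by
          rw [fam, if_neg ?_]
          simp only [List.all_eq_true, decide_eq_true_eq]
          intro hcon
          have := hcon z hzmem
          rw [hgy] at hz
          rw [hx] at this
          omega
        have hf2 : fam (L.getD s.toNat 0 :: x :: rest) = 1 + fam (x :: rest) := by
          rw [fam, if_neg ?_]
          simp only [List.all_cons, List.all_eq_true, Bool.and_eq_true, decide_eq_true_eq]
          intro hcon
          exact hz (hcon.2 z hzmem)
        rw [hf1, hf2, hfx]
        rw [if_neg (by omega), if_neg (by omega)]
        push_cast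
        omega

-- First index of the minimum value: if m is a lower bound of t and occurs in t,
-- then its first position in t is fam t.
lemma index_min (t : List Int) (m : Int) (hmem : m ∈ t) (hmin : ∀ y ∈ t, m ≤ y) :
    PySem.List.index? t m = some (fam t) := by
  induction t with
  | nil => simp at hmem
  | cons x rest IH =>
    by_cases hall : rest.all (fun z => decide (x ≤ z)) = true
    · have hmx : m = x := by
        rcases List.mem_cons.mp hmem with h | h
        · exact h
        · have h1 : x ≤ m := by
            simp only [List.all_eq_true, decide_eq_true_eq] at hall
            exact hall m h
          have h2 : m ≤ x := hmin x (List.mem_cons_self ..)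
          omega
      rw [fam, if_pos hall, hmx]
      exact PySem.List.index?_cons_self ..
    · obtain ⟨z, hzmem, hz⟩ : ∃ z ∈ rest, ¬ (x ≤ z) := by simpa using hall
      have hne : x ≠ m := by
        have := hmin z (List.mem_cons_of_mem _ hzmem)
        omega
      have hmrest : m ∈ rest := by
        rcases List.mem_cons.mp hmem with h | h
        · exact absurd h.symm hne
        · exact h
      rw [fam, if_neg hall, PySem.List.index?_cons_of_ne rest hne,
          IH hmrest (fun y hy => hmin y (List.mem_cons_of_mem _ hy))]
      simp [Nat.add_comm]

-- ===== VERDICT (by name: the statement is the Claim_ definition above) =====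
theorem find_min_spec : Claim_unchanged_find_min := by
  intro L b _hdom hpre
  unfold Spec_find_min D_find_min
  intro hnd
  obtain ⟨_hp1, hp2⟩ := hpre
  have hb0 : 0 ≤ b := by omega
  have hblt : b.toNat < L.length := by omega
  have hdropb : L.drop b.toNat = L[b.toNat] :: L.drop (b.toNat + 1) :=
    List.drop_eq_getElem_cons hblt
  have hA : find_min L b = b + (fam (L.drop b.toNat) : Int) := by
    rw [find_min, loop_char L (L.drop (b + 1).toNat) b (b + 1) hb0 hp2 (by omega) rfl]
    have htn : (b + 1).toNat = b.toNat + 1 := by omega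
    have hg : L.getD b.toNat 0 = L[b.toNat] := List.getD_eq_getElem L 0 hblt
    rw [htn, hg, ← hdropb]
    rcases Nat.eq_zero_or_pos (fam (L.drop b.toNat)) with h | h
    · rw [h]; simp
    · rw [if_neg (by omega)]; omega
  have hclamp : PySem.List.clampIdx L.length b = b.toNat := by
    have hb : b = ((b.toNat : Nat) : Int) := by omega
    rw [hb, PySem.List.clampIdx_natCast]; omega
  rw [hA, find_min_alt]
  simp only [PySem.List.slice_some_none, hclamp]
  have htne : L.drop b.toNat ≠ [] := by rw [hdropb]; exact List.cons_ne_nil _ _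
  cases hmm : PySem.List.min? (L.drop b.toNat) (fun x => x) with
  | none => exact absurd ((PySem.List.min?_eq_none_iff _ _).mp hmm) htne
  | some m =>
    have hmem := PySem.List.min?_mem hmm
    have hmin : ∀ y ∈ L.drop b.toNat, m ≤ y := PySem.List.min?_isMin hmm
    simp only [index_min (L.drop b.toNat) m hmem hmin]
    push_cast
    omega

theorem find_min_changed : Claim_changed_find_min := by
  unfold Claim_changed_find_min
  refine ⟨by decide, by decide, by decide, ?_, by decide, by decide⟩
  show find_min [1, 3] (-1) = 0
  simp [find_min, findMinLoop, PySem.List.pyGet?, PySem.List.pyIdx?]
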